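-- pv_equiv track=rewrite | github.com/Shirley-sys-25/MindMesh-New | backend/orchestrator/app/crew/orchestrator.py | _latest_user_message
-- ===== SOURCE A (Python) =====
-- def _latest_user_message(messages: list[dict[str, str]]) -> str:
--     latest_user_message = ""
--     for message in reversed(messages):
--         if message.get("role") == "user":
--             latest_user_message = message.get("content", "")
--             break
--
--     if not latest_user_message:
--         return "Precise ton objectif principal."
--     return latest_user_message
-- ===== SOURCE B (Python) =====
-- def _latest_user_message(messages: list[dict[str, str]]) -> str:
--     users = [m for m in messages if m.get("role") == "user"]
--     content = users[-1].get("content", "") if users else ""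
--     return content if content else "Precise ton objectif principal."
-- ===== Notes on version B (the rewrite author's own statement) =====
-- stated objective: simpler
-- what changed: Replaced A's reverse scan with early break by a forward filter of user messages followed by selecting the last one.
import Mathlib
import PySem

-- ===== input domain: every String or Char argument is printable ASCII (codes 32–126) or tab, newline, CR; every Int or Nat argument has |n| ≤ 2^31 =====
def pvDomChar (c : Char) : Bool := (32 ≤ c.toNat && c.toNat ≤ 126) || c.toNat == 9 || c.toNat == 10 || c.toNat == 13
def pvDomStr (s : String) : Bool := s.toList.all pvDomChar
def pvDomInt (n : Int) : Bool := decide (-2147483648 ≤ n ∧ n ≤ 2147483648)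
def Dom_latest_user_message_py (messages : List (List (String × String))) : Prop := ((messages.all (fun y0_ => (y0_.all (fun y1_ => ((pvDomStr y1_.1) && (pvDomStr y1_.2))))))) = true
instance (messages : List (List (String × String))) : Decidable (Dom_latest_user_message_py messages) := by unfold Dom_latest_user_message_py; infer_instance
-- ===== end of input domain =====

-- ===== PORT A =====
-- A: scan the messages in reverse, stop at the first with role "user", take its content (default "");
-- the loop-with-break is transliterated as structural recursion over messages.reverse.
def pvScanA : List (List (String × String)) → String
  | [] => ""
  | m :: rest =>
      if PySem.Dict.get? ⟨m⟩ "role" == some "user" then PySem.Dict.getD ⟨m⟩ "content" ""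
      else pvScanA rest

def latest_user_message_py (messages : List (List (String × String))) : String :=
  let latest := pvScanA messages.reverse
  if latest = "" then "Precise ton objectif principal." else latest

-- ===== PORT B =====
-- B: filter the user messages in a forward pass, then take the last one's content.
def latest_user_message_py_alt (messages : List (List (String × String))) : String :=
  let users := messages.filter (fun m => PySem.Dict.get? ⟨m⟩ "role" == some "user")
  let content := match users.getLast? with
    | some m => PySem.Dict.getD ⟨m⟩ "content" ""
    | none => ""
  if content = "" then "Precise ton objectif principal." else content

-- ===== PRECONDITION & SPEC =====
def Spec_latest_user_message_py (messages : List (List (String × String))) (out : String) : Prop := out = latest_user_message_py_alt messages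
instance (messages : List (List (String × String))) (out : String) : Decidable (Spec_latest_user_message_py messages out) := by unfold Spec_latest_user_message_py; infer_instance

-- ===== CLAIM (what is proved, stated in full; the proofs are below) =====
def Claim_equal_latest_user_message_py : Prop := ∀ (messages : List (List (String × String))), Dom_latest_user_message_py messages → Spec_latest_user_message_py messages (latest_user_message_py messages)

-- ===== LEMMAS AND PROOFS =====
-- A's reverse scan is find? on the reversed list.
theorem pvScanA_eq_find (l : List (List (String × String))) :
    pvScanA l = (match l.find? (fun m => PySem.Dict.get? ⟨m⟩ "role" == some "user") with
      | some m => PySem.Dict.getD ⟨m⟩ "content" ""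
      | none => "") := by
  induction l with
  | nil => rfl
  | cons m rest ih =>
      by_cases h : (PySem.Dict.get? ⟨m⟩ "role" == some "user") = true <;>
        simp [pvScanA, List.find?, h, ih]

-- ===== VERDICT (by name: the statement is the Claim_ definition above) =====
theorem latest_user_message_py_spec : Claim_equal_latest_user_message_py := by
  intro messages _
  unfold Spec_latest_user_message_py latest_user_message_py latest_user_message_py_alt
  rw [pvScanA_eq_find]
  simp only [List.getLast?_filter]
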